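-- pv_equiv track=rewrite | github.com/TrellixVulnTeam/SI_Lista2_LOM9 | skycrapper.py | calculate_visable_buildings
-- ===== SOURCE A (Python) =====
-- def calculate_visable_buildings(table):
--     howMany = 0
--     for i in range(table.__len__()):
--         isVisable = True
--         for j in range(0, i):
--             if table[j] > table[i]:
--                 isVisable = False
--         if isVisable:
--             howMany += 1
--     return howMany
-- ===== SOURCE B (Python) =====
-- def calculate_visable_buildings(table):
--     howMany = 0
--     best = None
--     for x in table:
--         if best is None or x >= best:
--             howMany += 1
--             best = x
--     return howMany
-- ===== Notes on version B (the rewrite author's own statement) =====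
-- stated objective: faster
-- what changed: Replaced the nested scan of all earlier buildings with a single pass that keeps the running maximum and counts each building at least as tall as it.
import Mathlib
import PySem

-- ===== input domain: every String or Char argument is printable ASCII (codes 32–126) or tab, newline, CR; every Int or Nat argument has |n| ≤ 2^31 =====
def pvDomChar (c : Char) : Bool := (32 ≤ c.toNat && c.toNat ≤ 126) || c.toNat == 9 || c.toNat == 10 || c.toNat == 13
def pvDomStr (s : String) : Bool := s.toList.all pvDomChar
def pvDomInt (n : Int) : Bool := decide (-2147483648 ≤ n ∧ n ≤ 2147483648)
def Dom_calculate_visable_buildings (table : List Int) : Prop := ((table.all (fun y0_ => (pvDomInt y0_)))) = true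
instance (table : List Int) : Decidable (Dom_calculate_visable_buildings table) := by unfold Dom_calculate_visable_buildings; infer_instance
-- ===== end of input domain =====

-- B is a single pass over the list keeping the running maximum (O(n)) instead of
-- A's re-scan of every earlier building (O(n^2)); same return value everywhere.

-- ===== PORT A =====
-- literal transliteration of A: outer loop over range(len(table)), inner loop over range(0, i)
def calculate_visable_buildings (table : List Int) : Int :=
  (PySem.List.pyRange 0 (table.length : Int) 1).foldl (fun howMany i =>
    if (PySem.List.pyRange 0 i 1).foldl (fun isVisable j =>
        if PySem.List.pyGetD table j 0 > PySem.List.pyGetD table i 0 then false else isVisable) true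
    then howMany + 1 else howMany) 0

-- ===== PORT B =====
-- one step of B's loop: state (howMany, best)
def pvStepB (p : Int × Option Int) (x : Int) : Int × Option Int :=
  match p.2 with
  | none => (p.1 + 1, some x)
  | some b => if b ≤ x then (p.1 + 1, some x) else p

def calculate_visable_buildings_alt (table : List Int) : Int :=
  (table.foldl pvStepB (0, none)).1

-- ===== PRECONDITION & SPEC =====
def Spec_calculate_visable_buildings (table : List Int) (out : Int) : Prop := out = calculate_visable_buildings_alt table
instance (table : List Int) (out : Int) : Decidable (Spec_calculate_visable_buildings table out) := by unfold Spec_calculate_visable_buildings; infer_instance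

-- ===== CLAIM (what is proved, stated in full; the proofs are below) =====
def Claim_equal_calculate_visable_buildings : Prop := ∀ (table : List Int), Dom_calculate_visable_buildings table → Spec_calculate_visable_buildings table (calculate_visable_buildings table)

-- ===== LEMMAS AND PROOFS =====

-- inner-loop shape: a fold that can only switch the flag to false computes `v && all ¬P`
theorem pv_foldl_flag (p : Int → Prop) [DecidablePred p] (l : List Int) (v : Bool) :
    l.foldl (fun acc j => if p j then false else acc) v
      = (v && l.all (fun j => !(decide (p j)))) := by
  induction l generalizing v with
  | nil => simp
  | cons j l ih =>
    simp only [List.foldl_cons, List.all_cons, ih]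
    by_cases h : p j <;> simp [h]

-- appending an element keeps earlier lookups unchanged
theorem pv_pyGetD_append_left (l : List Int) (x d i : Int) (h0 : 0 ≤ i) (h : i < (l.length : Int)) :
    PySem.List.pyGetD (l ++ [x]) i d = PySem.List.pyGetD l i d := by
  have hi : i = ((i.toNat : Nat) : Int) := by omega
  rw [hi, PySem.List.pyGetD_natCast, PySem.List.pyGetD_natCast]
  have hlt : i.toNat < l.length := by omega
  simp [List.getD_eq_getElem?_getD, List.getElem?_append_left hlt]

-- A satisfies the right-append recursion
theorem pv_A_append (l : List Int) (x : Int) :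
    calculate_visable_buildings (l ++ [x]) =
      calculate_visable_buildings l + (if l.all (fun y => decide (y ≤ x)) then 1 else 0) := by
  unfold calculate_visable_buildings
  have hlen : ((l ++ [x]).length : Int) = (l.length : Int) + 1 := by simp
  rw [hlen, PySem.List.pyRange_one_succ_right (by positivity), List.foldl_append]
  have hfirst :
      (PySem.List.pyRange 0 (l.length : Int) 1).foldl (fun (howMany : Int) i =>
        if (PySem.List.pyRange 0 i 1).foldl (fun isVisable j =>
            if PySem.List.pyGetD (l ++ [x]) j 0 > PySem.List.pyGetD (l ++ [x]) i 0 then false else isVisable) true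
        then howMany + 1 else howMany) (0 : Int)
      = (PySem.List.pyRange 0 (l.length : Int) 1).foldl (fun (howMany : Int) i =>
        if (PySem.List.pyRange 0 i 1).foldl (fun isVisable j =>
            if PySem.List.pyGetD l j 0 > PySem.List.pyGetD l i 0 then false else isVisable) true
        then howMany + 1 else howMany) (0 : Int) := by
    apply PySem.List.foldl_congr_mem
    intro acc i hi
    have hi' := (PySem.List.mem_pyRange_one).1 hi
    have hix : PySem.List.pyGetD (l ++ [x]) i 0 = PySem.List.pyGetD l i 0 :=
      pv_pyGetD_append_left l x 0 i hi'.1 hi'.2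
    have hinner :
        (PySem.List.pyRange 0 i 1).foldl (fun isVisable j =>
          if PySem.List.pyGetD (l ++ [x]) j 0 > PySem.List.pyGetD (l ++ [x]) i 0 then false else isVisable) true
        = (PySem.List.pyRange 0 i 1).foldl (fun isVisable j =>
          if PySem.List.pyGetD l j 0 > PySem.List.pyGetD l i 0 then false else isVisable) true := by
      apply PySem.List.foldl_congr_mem
      intro acc' j hj
      have hj' := (PySem.List.mem_pyRange_one).1 hj
      rw [hix, pv_pyGetD_append_left l x 0 j hj'.1 (lt_trans hj'.2 hi'.2)]
    rw [hinner]
  rw [List.foldl_cons, List.foldl_nil, hfirst]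
  -- the last iteration, i = l.length
  have hget_last : PySem.List.pyGetD (l ++ [x]) (l.length : Int) 0 = x := by
    rw [PySem.List.pyGetD_natCast]
    simp
  have hvis :
      (PySem.List.pyRange 0 (l.length : Int) 1).foldl (fun isVisable j =>
        if PySem.List.pyGetD (l ++ [x]) j 0 > PySem.List.pyGetD (l ++ [x]) (l.length : Int) 0 then false else isVisable) true
      = l.all (fun y => decide (y ≤ x)) := by
    have hcong :
        (PySem.List.pyRange 0 (l.length : Int) 1).foldl (fun isVisable j =>
          if PySem.List.pyGetD (l ++ [x]) j 0 > PySem.List.pyGetD (l ++ [x]) (l.length : Int) 0 then false else isVisable) true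
        = (PySem.List.pyRange 0 (l.length : Int) 1).foldl (fun isVisable j =>
          if PySem.List.pyGetD l j 0 > x then false else isVisable) true := by
      apply PySem.List.foldl_congr_mem
      intro acc j hj
      have hj' := (PySem.List.mem_pyRange_one).1 hj
      rw [hget_last, pv_pyGetD_append_left l x 0 j hj'.1 hj'.2]
    rw [hcong, pv_foldl_flag (fun j => PySem.List.pyGetD l j 0 > x), Bool.true_and]
    have hmap := PySem.List.map_pyGetD_pyRange_zero' l (0 : Int)
    calc (PySem.List.pyRange 0 (l.length : Int) 1).all
            (fun j => !decide (PySem.List.pyGetD l j 0 > x))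
        = ((PySem.List.pyRange 0 (l.length : Int) 1).map (fun j => PySem.List.pyGetD l j 0)).all
            (fun y => !decide (y > x)) := by rw [List.all_map]; rfl
      _ = l.all (fun y => !decide (y > x)) := by rw [hmap]
      _ = l.all (fun y => decide (y ≤ x)) := by
            congr 1; funext y; rw [Bool.eq_iff_iff]; simp [decide_eq_true_iff]
  rw [hvis]
  split <;> simp

-- B's running state after a nonempty prefix: count so far, and the prefix maximum
theorem pv_B_state (l : List Int) (c b : Int) :
    (l.foldl pvStepB (c, some b)).2 = some (l.foldl max b) := by
  induction l generalizing c b with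
  | nil => rfl
  | cons y l ih =>
    simp only [List.foldl_cons]
    by_cases h : b ≤ y
    · simp only [pvStepB, h, if_pos]
      rw [ih]
      congr 2
      omega
    · have : pvStepB (c, some b) y = (c, some b) := by simp [pvStepB, h]
      rw [this, ih]
      congr 2
      omega

-- B satisfies the same right-append recursion
theorem pv_B_append (l : List Int) (x : Int) :
    calculate_visable_buildings_alt (l ++ [x]) =
      calculate_visable_buildings_alt l + (if l.all (fun y => decide (y ≤ x)) then 1 else 0) := by
  unfold calculate_visable_buildings_alt
  rw [List.foldl_append, List.foldl_cons, List.foldl_nil]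
  cases l with
  | nil => simp [pvStepB]
  | cons y t =>
    have hstate : ((y :: t).foldl pvStepB ((0 : Int), (none : Option Int))).2
        = some (t.foldl max y) := by
      simp only [List.foldl_cons]
      have : pvStepB (0, none) y = (1, some y) := rfl
      rw [this, pv_B_state]
    set s := (y :: t).foldl pvStepB ((0 : Int), (none : Option Int)) with hs
    have hmax := PySem.List.le_foldl_max t y
    have hmem := PySem.List.foldl_max_mem t y
    by_cases h : (y :: t).all (fun z => decide (z ≤ x))
    · have hle : t.foldl max y ≤ x := by
        simp only [List.all_cons, Bool.and_eq_true, List.all_eq_true, decide_eq_true_eq] at h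
        rcases hmem with hm | hm
        · omega
        · exact h.2 _ hm
      simp [pvStepB, hstate, hle, h]
    · have hgt : ¬ (t.foldl max y ≤ x) := by
        simp only [List.all_cons, Bool.and_eq_true, List.all_eq_true, decide_eq_true_eq] at h
        push Not at h
        rcases Decidable.em (y ≤ x) with hy | hy
        · obtain ⟨z, hz, hzx⟩ := h hy
          have := hmax.2 z hz
          omega
        · have := hmax.1
          omega
      have : pvStepB s x = s := by
        simp only [pvStepB, hstate, hgt]
        exact (Prod.mk.eta)
      rw [this]
      simp [h]


theorem pv_eq (table : List Int) :
    calculate_visable_buildings table = calculate_visable_buildings_alt table := by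
  induction table using List.reverseRecOn with
  | nil => rfl
  | append_singleton l x ih => rw [pv_A_append, pv_B_append, ih]

-- ===== VERDICT (by name: the statement is the Claim_ definition above) =====
theorem calculate_visable_buildings_spec : Claim_equal_calculate_visable_buildings := by
  intro table _
  exact pv_eq table
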